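-- pv_equiv track=rewrite | github.com/sunilsoni/interview-notes-python | com/interview/2026/uber/test2.py | is_valid_alien_order
-- ===== SOURCE A (Python) =====
-- def is_valid_alien_order(words, order):  # This checks if 'order' truly works for the given sorted word list
--     if order == []:  # If order is empty, it might be correct only if the dictionary is invalid
--         # We cannot easily prove invalidity here without recomputing, so we treat empty as "valid only if algorithm returned it"
--         return False  # For testing, empty should fail unless expected is specifically empty
--
--     rank = {}  # rank[ch] = position of ch in the alien order
--     for i, ch in enumerate(order):  # Build rank mapping to compare characters quickly
--         rank[ch] = i  # Store numeric rank
--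
--     # Collect all unique chars from words to ensure order includes them all
--     all_chars = set()  # Set of all unique characters in dictionary
--     for w in words:  # Loop through words
--         for ch in w:  # Loop through chars in word
--             all_chars.add(ch)  # Add char to the set
--
--     if set(order) != all_chars:  # Order must contain exactly the unique characters
--         return False  # If missing or extra characters, it is not a valid answer
--
--     # Compare each adjacent pair to ensure word[i] <= word[i+1] under this alien order
--     for i in range(len(words) - 1):  # Adjacent pairs define sorted property
--         w1 = words[i]  # First word
--         w2 = words[i + 1]  # Next word
--
--         # Compare w1 and w2 using alien ranking
--         min_len = min(len(w1), len(w2))  # Only compare shared length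
--         decided = False  # Track whether we found a difference and decided ordering
--
--         for j in range(min_len):  # Walk character by character
--             c1 = w1[j]  # Char from first word
--             c2 = w2[j]  # Char from second word
--
--             if c1 != c2:  # If we find first difference
--                 if rank[c1] > rank[c2]:  # If c1 should come after c2, order is wrong
--                     return False  # Not sorted correctly
--                 decided = True  # We successfully decided this pair ordering
--                 break  # Stop at first difference
--
--         if not decided:  # If all compared chars were the same up to min_len
--             if len(w1) > len(w2):  # Then shorter must come first, otherwise invalid
--                 return False  # Not sorted under this alien order
--
--     return True  # If all adjacent checks passed, order is valid
-- ===== SOURCE B (Python) =====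
-- def is_valid_alien_order(words, order):
--     if order == []:
--         return False
--     rank = {ch: i for i, ch in enumerate(order)}
--     all_chars = {ch for w in words for ch in w}
--     if set(order) != all_chars:
--         return False
--     return words == sorted(words, key=lambda w: [rank[ch] for ch in w])
-- ===== Notes on version B (the rewrite author's own statement) =====
-- stated objective: idiomatic
-- what changed: replaces A's hand-written adjacent-pair loops with their char-by-char comparison and 'decided' flag by a single check 'words == sorted(words, key=lambda w: [rank[ch] for ch in w])' built on rank-list keys and Python's list comparison
import Mathlib
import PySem

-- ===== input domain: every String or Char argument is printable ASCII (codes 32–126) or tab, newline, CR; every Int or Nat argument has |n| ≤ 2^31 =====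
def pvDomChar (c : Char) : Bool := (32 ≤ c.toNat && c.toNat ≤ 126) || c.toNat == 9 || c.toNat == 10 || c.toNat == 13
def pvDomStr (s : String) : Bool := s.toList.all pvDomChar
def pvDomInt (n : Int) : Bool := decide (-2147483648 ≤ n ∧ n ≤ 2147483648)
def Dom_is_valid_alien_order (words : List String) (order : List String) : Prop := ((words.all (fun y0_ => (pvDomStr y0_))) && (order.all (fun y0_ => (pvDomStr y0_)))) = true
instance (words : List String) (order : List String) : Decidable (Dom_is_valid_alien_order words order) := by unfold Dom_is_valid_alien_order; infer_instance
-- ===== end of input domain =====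

-- B replaces A's hand-written adjacent-pair character-comparison loops by checking
-- words == sorted(words, key = list of alien ranks) — idiomatic, same cost class.


-- ===== PORT A =====
-- inner 'for j in range(min_len)' loop with the 'decided' flag and early 'return False':
-- structural recursion over the two character lists (rank lookups are total via getD: the
-- set-equality guard makes every lookup hit a key, exactly where Python's rank[c] returns)
def pvPairOkA (rank : PySem.Dict String Int) : List Char → List Char → Bool
  | c1 :: t1, c2 :: t2 =>
    if c1 ≠ c2 then
      !(rank.getD (String.singleton c1) 0 > rank.getD (String.singleton c2) 0)
    else pvPairOkA rank t1 t2
  | [], _ => true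
  | _ :: _, [] => false

-- outer 'for i in range(len(words) - 1)' loop with early 'return False'
def pvChainOkA (rank : PySem.Dict String Int) : List String → Bool
  | w1 :: w2 :: rest => pvPairOkA rank w1.toList w2.toList && pvChainOkA rank (w2 :: rest)
  | _ => true

def is_valid_alien_order (words : List String) (order : List String) : Bool :=
  if order = [] then false
  else
    let rank : PySem.Dict String Int :=
      (PySem.List.enumerate order 0).foldl (fun d p => d.insert p.2 p.1) PySem.Dict.empty
    let all_chars : PySem.Set String :=
      words.foldl (fun s w => w.toList.foldl (fun s ch => PySem.Set.add s (String.singleton ch)) s)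
        PySem.Set.empty
    if !(PySem.Set.equal (PySem.Set.ofList order) all_chars) then false
    else pvChainOkA rank words

-- ===== PORT B =====
-- key=lambda w: [rank[ch] for ch in w]
def pvKeyB (rank : PySem.Dict String Int) (w : String) : List Int :=
  w.toList.map (fun ch => rank.getD (String.singleton ch) 0)

def is_valid_alien_order_alt (words : List String) (order : List String) : Bool :=
  if order = [] then false
  else
    let rank : PySem.Dict String Int :=
      (PySem.List.enumerate order 0).foldl (fun d p => d.insert p.2 p.1) PySem.Dict.empty
    let all_chars : PySem.Set String :=
      PySem.Set.ofList (words.flatMap (fun w => w.toList.map String.singleton))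
    if !(PySem.Set.equal (PySem.Set.ofList order) all_chars) then false
    else decide (words = PySem.List.sorted words (pvKeyB rank) false)

-- ===== PRECONDITION & SPEC =====
def Spec_is_valid_alien_order (words : List String) (order : List String) (out : Bool) : Prop := out = is_valid_alien_order_alt words order
instance (words : List String) (order : List String) (out : Bool) : Decidable (Spec_is_valid_alien_order words order out) := by unfold Spec_is_valid_alien_order; infer_instance

-- ===== CLAIM (what is proved, stated in full; the proofs are below) =====
def Claim_equal_is_valid_alien_order : Prop := ∀ (words : List String) (order : List String), Dom_is_valid_alien_order words order → Spec_is_valid_alien_order words order (is_valid_alien_order words order)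

-- ===== LEMMAS AND PROOFS =====

-- characterizations of Mathlib's lexicographic ≤ on List ℤ (Python's list comparison)
theorem pv_nil_le (l : List Int) : ([] : List Int) ≤ l := by
  rw [le_iff_lt_or_eq]
  cases l with
  | nil => exact Or.inr rfl
  | cons x xs => exact Or.inl List.Lex.nil

theorem pv_not_cons_le_nil (a : Int) (l : List Int) : ¬ (a :: l ≤ ([] : List Int)) := by
  rw [le_iff_lt_or_eq]
  rintro (h | h)
  · exact nomatch h
  · simp at h

theorem pv_cons_le_cons_iff (a b : Int) (l m : List Int) :
    (a :: l ≤ b :: m) ↔ (a < b ∨ (a = b ∧ l ≤ m)) := by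
  rw [le_iff_lt_or_eq]
  constructor
  · rintro (h | h)
    · have h' : List.Lex (· < ·) (a :: l) (b :: m) := h
      cases h' with
      | cons h' =>
        exact Or.inr ⟨rfl, by rw [le_iff_lt_or_eq]; exact Or.inl h'⟩
      | rel h' => exact Or.inl h'
    · injection h with h1 h2
      exact Or.inr ⟨h1, le_of_eq h2⟩
  · rintro (h | ⟨rfl, h⟩)
    · exact Or.inl (List.Lex.rel h)
    · rcases lt_or_eq_of_le h with h | h
      · exact Or.inl (List.Lex.cons h)
      · exact Or.inr (by rw [h])

-- A's nested all_chars loop builds the same set as B's comprehension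
theorem pv_allchars_aux (words : List String) (s : PySem.Set String) :
    words.foldl (fun s w => w.toList.foldl (fun s ch => PySem.Set.add s (String.singleton ch)) s) s
      = PySem.Set.update s (words.flatMap (fun w => w.toList.map String.singleton)) := by
  induction words generalizing s with
  | nil => simp [PySem.Set.update_nil]
  | cons w ws ih =>
    simp only [List.foldl_cons, List.flatMap_cons]
    rw [ih, ← PySem.Set.update_map_eq_foldl_add, PySem.Set.update_append]

-- specialized to the empty starting set
theorem pv_allchars_eq (words : List String) :
    words.foldl (fun s w => w.toList.foldl (fun s ch => PySem.Set.add s (String.singleton ch)) s)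
        PySem.Set.empty
      = PySem.Set.ofList (words.flatMap (fun w => w.toList.map String.singleton)) := by
  rw [pv_allchars_aux]
  exact PySem.Set.update_nil_left _

-- invariant of the rank-building loop: values stay below the running index, lookups are
-- injective, and every key already present or still to come ends up present
theorem pv_rank_invariant (os : List String) (s : Int) (d : PySem.Dict String Int)
    (hlt : ∀ k v, d.get? k = some v → v < s)
    (hinj : ∀ k1 k2 v, d.get? k1 = some v → d.get? k2 = some v → k1 = k2) :
    (∀ k v, ((PySem.List.enumerate os s).foldl (fun d p => d.insert p.2 p.1) d).get? k = some v → v < s + os.length) ∧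
    (∀ k1 k2 v, ((PySem.List.enumerate os s).foldl (fun d p => d.insert p.2 p.1) d).get? k1 = some v →
       ((PySem.List.enumerate os s).foldl (fun d p => d.insert p.2 p.1) d).get? k2 = some v → k1 = k2) ∧
    (∀ k, ((d.get? k).isSome ∨ k ∈ os) →
       (((PySem.List.enumerate os s).foldl (fun d p => d.insert p.2 p.1) d).get? k).isSome) := by
  induction os generalizing s d with
  | nil =>
    simp only [PySem.List.enumerate_nil, List.foldl_nil]
    refine ⟨fun k v h => ?_, hinj, fun k h => ?_⟩
    · have := hlt k v h
      simp only [List.length_nil, Nat.cast_zero]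
      omega
    · rcases h with h | h
      · exact h
      · simp at h
  | cons x os ih =>
    rw [PySem.List.enumerate_cons]
    simp only [List.foldl_cons]
    have hlt' : ∀ k v, ((d.insert x s).get? k = some v) → v < s + 1 := by
      intro k v h
      rw [PySem.Dict.get?_insert] at h
      split at h
      · cases h; omega
      · have := hlt k v h; omega
    have hinj' : ∀ k1 k2 v, (d.insert x s).get? k1 = some v → (d.insert x s).get? k2 = some v → k1 = k2 := by
      intro k1 k2 v h1 h2
      rw [PySem.Dict.get?_insert] at h1 h2
      by_cases e1 : k1 = x <;> by_cases e2 : k2 = x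
      · rw [e1, e2]
      · rw [if_pos e1] at h1; rw [if_neg e2] at h2
        cases h1; exact absurd (hlt _ _ h2) (by omega)
      · rw [if_neg e1] at h1; rw [if_pos e2] at h2
        cases h2; exact absurd (hlt _ _ h1) (by omega)
      · rw [if_neg e1] at h1; rw [if_neg e2] at h2
        exact hinj _ _ _ h1 h2
    obtain ⟨a, b, c⟩ := ih (s + 1) (d.insert x s) hlt' hinj'
    refine ⟨fun k v h => ?_, b, fun k h => ?_⟩
    · have h2 := a k v h
      simp only [List.length_cons]
      push_cast at h2 ⊢
      omega
    · refine c k ?_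
      rcases h with h | h
      · by_cases hk : k = x
        · subst hk; left; rw [PySem.Dict.get?_insert]; simp
        · left; rw [PySem.Dict.get?_insert, if_neg hk]; exact h
      · rcases List.mem_cons.mp h with h | h
        · subst h; left; rw [PySem.Dict.get?_insert]; simp
        · right; exact h

-- A's pair loop equals the lexicographic comparison of the two rank lists, given that
-- distinct characters get distinct ranks
theorem pv_pair_iff (rank : PySem.Dict String Int)
    (rv : Char → Int) (hrv : ∀ c, rv c = rank.getD (String.singleton c) 0)
    (l1 l2 : List Char)
    (hd : ∀ c1 ∈ l1, ∀ c2 ∈ l2, c1 ≠ c2 → rv c1 ≠ rv c2) :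
    pvPairOkA rank l1 l2 = true ↔ (l1.map rv ≤ l2.map rv) := by
  induction l1 generalizing l2 with
  | nil => simp [pvPairOkA, pv_nil_le]
  | cons c1 t1 ih =>
    cases l2 with
    | nil => simp [pvPairOkA, pv_not_cons_le_nil]
    | cons c2 t2 =>
      simp only [pvPairOkA, List.map_cons]
      by_cases h : c1 = c2
      · subst h
        rw [if_neg (by simp)]
        rw [ih t2 (fun a ha b hb => hd a (List.mem_cons_of_mem _ ha) b (List.mem_cons_of_mem _ hb))]
        have hiff : (rv c1 :: t1.map rv ≤ rv c1 :: t2.map rv) ↔ (t1.map rv ≤ t2.map rv) := by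
          rw [pv_cons_le_cons_iff]; simp
        simp [hiff]
      · rw [if_pos h, ← hrv c1, ← hrv c2]
        have hne : rv c1 ≠ rv c2 := hd c1 (by simp) c2 (by simp) h
        have hiff : (rv c1 :: t1.map rv ≤ rv c2 :: t2.map rv) ↔ rv c1 < rv c2 := by
          rw [pv_cons_le_cons_iff]
          constructor
          · rintro (h' | ⟨h', _⟩)
            · exact h'
            · exact absurd h' hne
          · exact fun h' => Or.inl h'
        by_cases hle : rv c1 ≤ rv c2
        · simp [hiff, lt_of_le_of_ne hle hne, not_lt.mpr hle]
        · simp [hiff, lt_of_not_ge hle, not_lt.mpr (le_of_lt (lt_of_not_ge hle))]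

-- the port of B elaborates `sorted` with core's `List.instLT` on `List ℤ`; it computes the
-- same list as `sorted` under Mathlib's `LinearOrder (List ℤ)` (both orders are `List.Lex (· < ·)`)
theorem pv_sorted_instances (xs : List String) (key : String → List Int) :
    @PySem.List.sorted String (List Int) List.instLT (fun a b => a.decidableLT b) xs key false
      = @PySem.List.sorted String (List Int)
          List.instLinearOrder.toPartialOrder.toPreorder.toLT
          (@LinearOrder.toDecidableLT _ List.instLinearOrder) xs key false := by
  rw [PySem.List.sorted_eq_foldl_insertBy,
    @PySem.List.sorted_eq_foldl_insertBy String (List Int)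
      List.instLinearOrder.toPartialOrder.toPreorder.toLT
      (@LinearOrder.toDecidableLT _ List.instLinearOrder) xs key]
  congr 1
  funext acc x
  congr 1
  funext a b
  exact decide_eq_decide.mpr ((List.lt_iff_lex_lt _ _).trans Iff.rfl)

-- A's adjacent-pair loop equals IsChain of "key ≤ key"
theorem pv_chain_iff (rank : PySem.Dict String Int) (ws : List String)
    (hd : ∀ w1 ∈ ws, ∀ w2 ∈ ws, ∀ c1 ∈ w1.toList, ∀ c2 ∈ w2.toList, c1 ≠ c2 →
      rank.getD (String.singleton c1) 0 ≠ rank.getD (String.singleton c2) 0) :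
    pvChainOkA rank ws = true ↔ List.IsChain (fun a b => pvKeyB rank a ≤ pvKeyB rank b) ws := by
  induction ws with
  | nil => simp [pvChainOkA]
  | cons w1 ws ih =>
    cases ws with
    | nil => simp [pvChainOkA]
    | cons w2 rest =>
      have hpair := pv_pair_iff rank (fun c => rank.getD (String.singleton c) 0) (fun _ => rfl)
        w1.toList w2.toList
        (fun c1 h1 c2 h2 hne => hd w1 (by simp) w2 (by simp) c1 h1 c2 h2 hne)
      have hrest := ih (fun a ha b hb => hd a (List.mem_cons_of_mem _ ha) b (List.mem_cons_of_mem _ hb))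
      simp only [pvChainOkA, Bool.and_eq_true, hpair, hrest, List.isChain_cons_cons, pvKeyB]

-- ===== VERDICT (by name: the statement is the Claim_ definition above) =====
theorem is_valid_alien_order_spec : Claim_equal_is_valid_alien_order := by
  intro words order _
  unfold Spec_is_valid_alien_order is_valid_alien_order is_valid_alien_order_alt
  by_cases hord : order = []
  · simp [hord]
  · simp only [if_neg hord]
    rw [pv_allchars_eq]
    by_cases heq : PySem.Set.equal (PySem.Set.ofList order)
        (PySem.Set.ofList (words.flatMap (fun w => w.toList.map String.singleton))) = true
    · simp only [heq, Bool.not_true, Bool.false_eq_true, if_false]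
      -- the two rank dicts are the same term
      set rank : PySem.Dict String Int :=
        (PySem.List.enumerate order 0).foldl (fun d p => d.insert p.2 p.1) PySem.Dict.empty with hrank
      -- every character occurring in words has a rank, and ranks of distinct keys differ
      obtain ⟨_, hinj, hsome⟩ := pv_rank_invariant order 0 PySem.Dict.empty
        (by intro k v h; simp [PySem.Dict.get?_empty] at h)
        (by intro k1 k2 v h1 h2; simp [PySem.Dict.get?_empty] at h1)
      have hmem := (PySem.Set.equal_iff _ _).mp heq
      have hd : ∀ w1 ∈ words, ∀ w2 ∈ words, ∀ c1 ∈ w1.toList, ∀ c2 ∈ w2.toList, c1 ≠ c2 →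
          rank.getD (String.singleton c1) 0 ≠ rank.getD (String.singleton c2) 0 := by
        intro w1 hw1 w2 hw2 c1 hc1 c2 hc2 hne
        have hin : ∀ (w : String) (c : Char), w ∈ words → c ∈ w.toList →
            ((rank.get? (String.singleton c)).isSome) := by
          intro w c hw hc
          have : String.singleton c ∈ words.flatMap (fun w => w.toList.map String.singleton) := by
            exact List.mem_flatMap.mpr ⟨w, hw, List.mem_map_of_mem hc⟩
          have : String.singleton c ∈ order :=
            (PySem.Set.mem_ofList _ _).mp ((hmem _).mpr ((PySem.Set.mem_ofList _ _).mpr this))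
          exact hsome _ (Or.inr this)
        obtain ⟨v1, hv1⟩ := Option.isSome_iff_exists.mp (hin w1 c1 hw1 hc1)
        obtain ⟨v2, hv2⟩ := Option.isSome_iff_exists.mp (hin w2 c2 hw2 hc2)
        rw [PySem.Dict.getD_of_get?_eq_some _ _ hv1, PySem.Dict.getD_of_get?_eq_some _ _ hv2]
        intro hvv
        subst hvv
        have := hinj _ _ _ hv1 hv2
        have : c1 = c2 := by
          have := congrArg String.toList this
          simpa [String.singleton] using this
        exact hne this
      rw [Bool.eq_iff_iff, decide_eq_true_eq, pv_chain_iff rank words hd]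
      have htrans : Trans (fun a b => pvKeyB rank a ≤ pvKeyB rank b)
          (fun a b => pvKeyB rank a ≤ pvKeyB rank b) (fun a b => pvKeyB rank a ≤ pvKeyB rank b) :=
        ⟨fun h1 h2 => le_trans h1 h2⟩
      rw [@List.isChain_iff_pairwise _ _ _ htrans]
      constructor
      · intro hp
        exact (PySem.List.sorted_eq_self_of_pairwise words (pvKeyB rank) hp).symm.trans
          (pv_sorted_instances words (pvKeyB rank)).symm
      · intro he
        have hml := PySem.List.sorted_pairwise words (pvKeyB rank)
        rw [← pv_sorted_instances words (pvKeyB rank), ← he] at hml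
        exact hml
    · simp only [Bool.not_eq_true] at heq
      simp [heq]
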